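-- pv_equiv track=rewrite | github.com/Ramo-11/Classical_Crypto_Decryption | utiilities.py | mod_26_inverse
-- ===== SOURCE A (Python) =====
-- def mod_26_inverse(a, b, c, d):
--     det = (a*d - b*c) % 26
--     det_inv = 0
--     for i in range(26):
--         if (det * i) % 26 == 1:
--             det_inv = i
--             break
--     return (d * det_inv) % 26, (-b * det_inv) % 26, (-c * det_inv) % 26, (a * det_inv) % 26
-- ===== SOURCE B (Python) =====
-- def mod_26_inverse(a, b, c, d):
--     det = (a*d - b*c) % 26
--     # extended Euclid on (det, 26): old_r is the gcd, old_s the Bezout coefficient of det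
--     old_r, r = det, 26
--     old_s, s = 1, 0
--     while r != 0:
--         q = old_r // r
--         old_r, r = r, old_r - q*r
--         old_s, s = s, old_s - q*s
--     det_inv = old_s % 26 if old_r == 1 else 0
--     return (d * det_inv) % 26, (-b * det_inv) % 26, (-c * det_inv) % 26, (a * det_inv) % 26
-- ===== Notes on version B (the rewrite author's own statement) =====
-- stated objective: alternative
-- what changed: Replaced the 26-iteration brute-force search for the determinant's modular inverse with the extended Euclidean algorithm (Bezout coefficient reduced mod 26; det_inv falls back to 0 when gcd(det,26) != 1, as in A).
import Mathlib
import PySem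

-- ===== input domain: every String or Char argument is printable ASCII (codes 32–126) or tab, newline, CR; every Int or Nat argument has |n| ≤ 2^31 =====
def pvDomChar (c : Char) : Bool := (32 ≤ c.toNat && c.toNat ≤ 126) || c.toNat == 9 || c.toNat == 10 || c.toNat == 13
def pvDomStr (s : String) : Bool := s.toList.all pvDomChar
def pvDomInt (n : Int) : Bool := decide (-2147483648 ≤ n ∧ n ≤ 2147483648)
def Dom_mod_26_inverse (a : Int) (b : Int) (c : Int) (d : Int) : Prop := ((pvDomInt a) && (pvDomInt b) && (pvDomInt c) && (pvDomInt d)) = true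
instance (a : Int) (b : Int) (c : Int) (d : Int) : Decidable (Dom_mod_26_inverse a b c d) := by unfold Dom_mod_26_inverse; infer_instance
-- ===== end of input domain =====

-- B replaces A's 26-iteration brute-force search for the modular inverse of the determinant
-- by the extended Euclidean algorithm (alternative; same observable behaviour, incl. det_inv = 0 when gcd ≠ 1).

-- ===== PORT A =====
-- the 'for i in range(26): if (det*i) % 26 == 1: det_inv = i; break' loop (det_inv starts at 0)
def pvFindInvA (det : Int) : List Int → Int
  | [] => 0
  | i :: rest => if PySem.Int.mod (det * i) 26 == 1 then i else pvFindInvA det rest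

def mod_26_inverse (a : Int) (b : Int) (c : Int) (d : Int) : Int × Int × Int × Int :=
  let det := PySem.Int.mod (a * d - b * c) 26
  let det_inv := pvFindInvA det (PySem.List.pyRange 0 26 1)
  (PySem.Int.mod (d * det_inv) 26, PySem.Int.mod (-b * det_inv) 26,
   PySem.Int.mod (-c * det_inv) 26, PySem.Int.mod (a * det_inv) 26)

-- ===== PORT B =====
-- the 'while r != 0' extended-Euclid loop of Source B; fuel only makes the recursion total
-- (starting from (det, 26) with 0 ≤ det < 26 the loop runs far fewer than 64 iterations)
def pvEgcdLoop (fuel : Nat) (old_r r old_s s : Int) : Int × Int :=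
  match fuel with
  | 0 => (old_r, old_s)
  | fuel + 1 =>
    if r == 0 then (old_r, old_s)
    else
      let q := PySem.Int.floordiv old_r r
      pvEgcdLoop fuel r (old_r - q * r) s (old_s - q * s)

def mod_26_inverse_alt (a : Int) (b : Int) (c : Int) (d : Int) : Int × Int × Int × Int :=
  let det := PySem.Int.mod (a * d - b * c) 26
  let p := pvEgcdLoop 64 det 26 1 0
  let det_inv := if p.1 == 1 then PySem.Int.mod p.2 26 else 0
  (PySem.Int.mod (d * det_inv) 26, PySem.Int.mod (-b * det_inv) 26,
   PySem.Int.mod (-c * det_inv) 26, PySem.Int.mod (a * det_inv) 26)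

-- ===== PRECONDITION & SPEC =====
def Spec_mod_26_inverse (a : Int) (b : Int) (c : Int) (d : Int) (out : Int × Int × Int × Int) : Prop := out = mod_26_inverse_alt a b c d
instance (a : Int) (b : Int) (c : Int) (d : Int) (out : Int × Int × Int × Int) : Decidable (Spec_mod_26_inverse a b c d out) := by unfold Spec_mod_26_inverse; infer_instance

-- ===== CLAIM (what is proved, stated in full; the proofs are below) =====
def Claim_equal_mod_26_inverse : Prop := ∀ (a : Int) (b : Int) (c : Int) (d : Int), Dom_mod_26_inverse a b c d → Spec_mod_26_inverse a b c d (mod_26_inverse a b c d)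

-- ===== LEMMAS AND PROOFS =====

-- both det_inv computations agree on every residue 0 ≤ det < 26 (checked by the kernel)
theorem pvInv_eq_fin : ∀ n : Fin 26,
    pvFindInvA (n.val : Int) (PySem.List.pyRange 0 26 1) =
      (let p := pvEgcdLoop 64 (n.val : Int) 26 1 0
       if p.1 == 1 then PySem.Int.mod p.2 26 else 0) := by decide

theorem pvInv_eq (det : Int) (h0 : 0 ≤ det) (h1 : det < 26) :
    pvFindInvA det (PySem.List.pyRange 0 26 1) =
      (let p := pvEgcdLoop 64 det 26 1 0
       if p.1 == 1 then PySem.Int.mod p.2 26 else 0) := by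
  have hdet : det = ((det.toNat : Nat) : Int) := (Int.toNat_of_nonneg h0).symm
  have hlt : det.toNat < 26 := by omega
  have := pvInv_eq_fin ⟨det.toNat, hlt⟩
  simpa [← hdet] using this

-- ===== VERDICT (by name: the statement is the Claim_ definition above) =====
theorem mod_26_inverse_spec : Claim_equal_mod_26_inverse := by
  intro a b c d _
  unfold Spec_mod_26_inverse mod_26_inverse mod_26_inverse_alt
  have h0 : 0 ≤ PySem.Int.mod (a * d - b * c) 26 := PySem.Int.mod_nonneg _ (by norm_num)
  have h1 : PySem.Int.mod (a * d - b * c) 26 < 26 := PySem.Int.mod_lt _ (by norm_num)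
  simp only [pvInv_eq _ h0 h1]
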